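-- pv_equiv track=rewrite | github.com/jakeatgalileo/ychackathon | mcp/dataset_tools.py | suggest_ml_tasks
-- ===== SOURCE A (Python) =====
-- from typing import Dict, List, Any, Optional
--
-- def suggest_ml_tasks(columns: List[str], data_types: Dict[str, str]) -> List[str]:
--     """
--     Suggest possible machine learning tasks based on the dataset structure.
--
--     Args:
--         columns: List of column names
--         data_types: Dictionary mapping column names to data types
--
--     Returns:
--         List of suggested ML tasks
--     """
--     tasks = []
--
--     # Check for classification indicators
--     classification_indicators = ["class", "category", "label", "type", "group"]
--     has_classification = any(ind in col.lower() for ind in classification_indicators for col in columns)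
--
--     if has_classification:
--         tasks.append("classification")
--
--     # Check for regression indicators
--     regression_indicators = ["value", "price", "amount", "score", "rating"]
--     has_regression = any(ind in col.lower() for ind in regression_indicators for col in columns)
--
--     if has_regression:
--         tasks.append("regression")
--
--     # Check for time series indicators
--     time_indicators = ["date", "time", "day", "month", "year", "timestamp"]
--     has_time = any(ind in col.lower() for ind in time_indicators for col in columns)
--
--     if has_time:
--         tasks.append("time series analysis")
--
--     # Check for clustering potential (when no clear target)
--     if not has_classification and not has_regression:
--         tasks.append("clustering")
--
--     # When we have text fields, suggest NLP
--     text_indicators = ["text", "description", "comment", "review", "message"]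
--     has_text = any(ind in col.lower() for ind in text_indicators for col in columns) or \
--               any(dt == "string" for dt in data_types.values())
--
--     if has_text:
--         tasks.append("natural language processing")
--
--     # Default if nothing detected
--     if not tasks:
--         tasks.append("exploratory data analysis")
--
--     return tasks
-- ===== SOURCE B (Python) =====
-- def suggest_ml_tasks(columns, data_types):
--     CLS = ("class", "category", "label", "type", "group")
--     REG = ("value", "price", "amount", "score", "rating")
--     TIM = ("date", "time", "day", "month", "year", "timestamp")
--     TXT = ("text", "description", "comment", "review", "message")
--     cls = reg = tim = txt = False
--     for col in columns:
--         low = col.lower()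
--         cls = cls or any(i in low for i in CLS)
--         reg = reg or any(i in low for i in REG)
--         tim = tim or any(i in low for i in TIM)
--         txt = txt or any(i in low for i in TXT)
--     txt = txt or any(dt == "string" for dt in data_types.values())
--     tasks = []
--     if cls:
--         tasks.append("classification")
--     if reg:
--         tasks.append("regression")
--     if tim:
--         tasks.append("time series analysis")
--     if not (cls or reg):
--         tasks.append("clustering")
--     if txt:
--         tasks.append("natural language processing")
--     return tasks or ["exploratory data analysis"]
-- ===== Notes on version B (the rewrite author's own statement) =====
-- stated objective: alternative
-- what changed: Replaces five independent nested scans of columns (indicator-outer, lowercasing every column name again for each indicator) with a single fold over columns that lowercases each name once and maintains four boolean flags, then assembles the task list from the flags in the original order.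
import Mathlib
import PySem

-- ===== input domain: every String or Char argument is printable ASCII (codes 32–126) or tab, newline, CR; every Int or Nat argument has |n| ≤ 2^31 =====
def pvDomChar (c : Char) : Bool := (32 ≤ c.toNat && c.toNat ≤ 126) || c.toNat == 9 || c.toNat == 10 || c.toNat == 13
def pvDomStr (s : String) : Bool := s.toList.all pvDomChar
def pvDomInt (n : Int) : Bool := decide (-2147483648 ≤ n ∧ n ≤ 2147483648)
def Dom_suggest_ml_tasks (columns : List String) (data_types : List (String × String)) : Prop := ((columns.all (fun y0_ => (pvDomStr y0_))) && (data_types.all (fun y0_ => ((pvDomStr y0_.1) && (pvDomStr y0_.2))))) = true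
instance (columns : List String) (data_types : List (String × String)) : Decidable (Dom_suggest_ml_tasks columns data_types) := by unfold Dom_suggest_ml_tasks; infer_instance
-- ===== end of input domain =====

-- B replaces A's five independent nested scans of `columns` by ONE fold over `columns`
-- keeping four boolean flags (one lower() per column); same cost, different traversal.

-- ===== PORT A =====
def suggest_ml_tasks (columns : List String) (data_types : List (String × String)) : List String :=
  let tasks : List String := []
  let classification_indicators : List String := ["class", "category", "label", "type", "group"]
  let has_classification := classification_indicators.any (fun ind => columns.any (fun col => PySem.Str.isIn ind (PySem.Str.lower col)))
  let tasks := if has_classification then tasks ++ ["classification"] else tasks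
  let regression_indicators : List String := ["value", "price", "amount", "score", "rating"]
  let has_regression := regression_indicators.any (fun ind => columns.any (fun col => PySem.Str.isIn ind (PySem.Str.lower col)))
  let tasks := if has_regression then tasks ++ ["regression"] else tasks
  let time_indicators : List String := ["date", "time", "day", "month", "year", "timestamp"]
  let has_time := time_indicators.any (fun ind => columns.any (fun col => PySem.Str.isIn ind (PySem.Str.lower col)))
  let tasks := if has_time then tasks ++ ["time series analysis"] else tasks
  let tasks := if !has_classification && !has_regression then tasks ++ ["clustering"] else tasks
  let text_indicators : List String := ["text", "description", "comment", "review", "message"]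
  let has_text := (text_indicators.any (fun ind => columns.any (fun col => PySem.Str.isIn ind (PySem.Str.lower col))))
      || ((PySem.Dict.ofList data_types).values.any (fun dt => dt == "string"))
  let tasks := if has_text then tasks ++ ["natural language processing"] else tasks
  let tasks := if tasks.isEmpty then tasks ++ ["exploratory data analysis"] else tasks
  tasks

-- ===== PORT B =====
-- any(i in low for i in inds)
def pvHit (inds : List String) (low : String) : Bool := inds.any (fun i => PySem.Str.isIn i low)

def suggest_ml_tasks_alt (columns : List String) (data_types : List (String × String)) : List String :=
  let CLS : List String := ["class", "category", "label", "type", "group"]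
  let REG : List String := ["value", "price", "amount", "score", "rating"]
  let TIM : List String := ["date", "time", "day", "month", "year", "timestamp"]
  let TXT : List String := ["text", "description", "comment", "review", "message"]
  let flags := columns.foldl (fun (s : Bool × Bool × Bool × Bool) col =>
      let low := PySem.Str.lower col
      (s.1 || pvHit CLS low, s.2.1 || pvHit REG low, s.2.2.1 || pvHit TIM low, s.2.2.2 || pvHit TXT low))
    (false, false, false, false)
  let cls := flags.1
  let reg := flags.2.1
  let tim := flags.2.2.1
  let txt := flags.2.2.2 || ((PySem.Dict.ofList data_types).values.any (fun dt => dt == "string"))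
  let tasks : List String := []
  let tasks := if cls then tasks ++ ["classification"] else tasks
  let tasks := if reg then tasks ++ ["regression"] else tasks
  let tasks := if tim then tasks ++ ["time series analysis"] else tasks
  let tasks := if !(cls || reg) then tasks ++ ["clustering"] else tasks
  let tasks := if txt then tasks ++ ["natural language processing"] else tasks
  if tasks.isEmpty then ["exploratory data analysis"] else tasks

-- ===== PRECONDITION & SPEC =====
def Spec_suggest_ml_tasks (columns : List String) (data_types : List (String × String)) (out : List String) : Prop := out = suggest_ml_tasks_alt columns data_types
instance (columns : List String) (data_types : List (String × String)) (out : List String) : Decidable (Spec_suggest_ml_tasks columns data_types out) := by unfold Spec_suggest_ml_tasks; infer_instance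

-- ===== CLAIM (what is proved, stated in full; the proofs are below) =====
def Claim_equal_suggest_ml_tasks : Prop := ∀ (columns : List String) (data_types : List (String × String)), Dom_suggest_ml_tasks columns data_types → Spec_suggest_ml_tasks columns data_types (suggest_ml_tasks columns data_types)

-- ===== LEMMAS AND PROOFS =====

-- B's single fold over columns computes, in each component, 'initial flag OR columns.any hit'.
theorem pv_foldl_flags (columns : List String) (c1 c2 c3 c4 : List String) (s : Bool × Bool × Bool × Bool) :
    columns.foldl (fun (s : Bool × Bool × Bool × Bool) col =>
        let low := PySem.Str.lower col
        (s.1 || pvHit c1 low, s.2.1 || pvHit c2 low, s.2.2.1 || pvHit c3 low, s.2.2.2 || pvHit c4 low)) s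
    = (s.1 || columns.any (fun col => pvHit c1 (PySem.Str.lower col)),
       s.2.1 || columns.any (fun col => pvHit c2 (PySem.Str.lower col)),
       s.2.2.1 || columns.any (fun col => pvHit c3 (PySem.Str.lower col)),
       s.2.2.2 || columns.any (fun col => pvHit c4 (PySem.Str.lower col))) := by
  induction columns generalizing s with
  | nil => obtain ⟨a, b, c, d⟩ := s; simp
  | cons h t ih => simp [List.foldl_cons, ih, Bool.or_assoc]

-- A scans indicators outermost, B scans columns outermost; both compute the same existential.
theorem pv_any_comm (l m : List String) (p : String → String → Bool) :
    (l.any fun a => m.any fun b => p a b) = (m.any fun b => l.any fun a => p a b) := by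
  apply Bool.eq_iff_iff.mpr
  simp only [List.any_eq_true]
  constructor
  · rintro ⟨a, ha, b, hb, h⟩; exact ⟨b, hb, a, ha, h⟩
  · rintro ⟨b, hb, a, ha, h⟩; exact ⟨a, ha, b, hb, h⟩

-- 'tasks or [default]': on the empty list, appending the default equals the default alone.
theorem pv_empty_append (e : List String) (x : String) :
    (if e.isEmpty then e ++ [x] else e) = (if e.isEmpty then [x] else e) := by
  cases e <;> simp

-- ===== VERDICT (by name: the statement is the Claim_ definition above) =====
theorem suggest_ml_tasks_spec : Claim_equal_suggest_ml_tasks := by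
  intro columns data_types _
  unfold Spec_suggest_ml_tasks suggest_ml_tasks suggest_ml_tasks_alt
  simp only [pv_foldl_flags, Bool.false_or]
  rw [pv_any_comm _ columns, pv_any_comm _ columns, pv_any_comm _ columns, pv_any_comm _ columns]
  simp only [pvHit, Bool.not_or]
  rw [pv_empty_append]
  rfl
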